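-- pv_equiv track=rewrite | github.com/Totomototo/A_MAZE_ING | maze_display.py | path_to_arrows
-- ===== SOURCE A (Python) =====
-- def path_to_arrows(
--         entry: tuple[int, int],
--         path: str
-- ) -> dict[tuple[int, int], str]:
--
--     x, y = entry
--     arrows: dict[tuple[int, int], str] = {}
--
--     moves: dict[str, tuple[int, int]] = {
--         "N": (0, -1),
--         "E": (1, 0),
--         "S": (0, 1),
--         "W": (-1, 0),
--     }
--
--     symbols: dict[str, str] = {
--         "N": "↑",
--         "E": "→",
--         "S": "↓",
--         "W": "←",
--     }
--
--     for direction in path: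
--         arrows[(x, y)] = symbols[direction]
--
--         dx, dy = moves[direction]
--         x += dx
--         y += dy
--
--     return arrows
-- ===== SOURCE B (Python) =====
-- def path_to_arrows(
--         entry: tuple[int, int],
--         path: str
-- ) -> dict[tuple[int, int], str]:
--     moves = {"N": (0, -1), "E": (1, 0), "S": (0, 1), "W": (-1, 0)}
--     symbols = {"N": "\u2191", "E": "\u2192", "S": "\u2193", "W": "\u2190"}
--     # Phase 1: the coordinate sequence visited (entry plus each successive position).
--     positions = [entry]
--     p = entry
--     for d in path:
--         dx, dy = moves[d]
--         p = (p[0] + dx, p[1] + dy)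
--         positions.append(p)
--     # Phase 2: pair each visited position with its direction; later revisits overwrite.
--     return {pos: symbols[d] for pos, d in zip(positions, path)}
-- ===== Notes on version B (the rewrite author's own statement) =====
-- stated objective: alternative
-- what changed: B separates the work into two phases: it first computes the full visited-coordinate sequence, then builds the result as a dict comprehension zipping positions with path characters, instead of A's single loop mutating (x, y) and the dict together.
import Mathlib
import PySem

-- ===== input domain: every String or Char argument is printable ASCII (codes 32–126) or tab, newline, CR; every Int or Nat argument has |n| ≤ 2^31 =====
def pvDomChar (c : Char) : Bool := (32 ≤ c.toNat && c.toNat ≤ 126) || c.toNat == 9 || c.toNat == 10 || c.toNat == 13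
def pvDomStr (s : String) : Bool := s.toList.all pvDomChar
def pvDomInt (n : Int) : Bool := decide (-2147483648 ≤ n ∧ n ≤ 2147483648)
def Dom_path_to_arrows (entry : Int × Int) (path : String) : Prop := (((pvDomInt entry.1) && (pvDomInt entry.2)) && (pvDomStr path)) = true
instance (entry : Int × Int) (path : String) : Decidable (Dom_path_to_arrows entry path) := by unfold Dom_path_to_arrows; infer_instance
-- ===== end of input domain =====

-- B rebuilds the same mapping in two phases (positions first, then one zip pass); return value only, no mutation involved.

-- ===== PORT A =====
-- the literal dicts `moves` and `symbols` of A (B's Python redeclares the same literals)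
def pvMoves : PySem.Dict Char (Int × Int) :=
  PySem.Dict.ofList [('N', (0, -1)), ('E', (1, 0)), ('S', (0, 1)), ('W', (-1, 0))]

def pvSymbols : PySem.Dict Char String :=
  PySem.Dict.ofList [('N', "↑"), ('E', "→"), ('S', "↓"), ('W', "←")]

-- A's loop body; `none` = KeyError on symbols[direction] / moves[direction]
def pvStepA (st : Option ((Int × Int) × PySem.Dict (Int × Int) String)) (c : Char) :
    Option ((Int × Int) × PySem.Dict (Int × Int) String) :=
  st.bind fun pd =>
    (pvSymbols.get? c).bind fun s =>
      (pvMoves.get? c).map fun m =>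
        ((pd.1.1 + m.1, pd.1.2 + m.2), pd.2.insert pd.1 s)

def path_to_arrows (entry : Int × Int) (path : String) : List (Int × Int × String) :=
  match path.toList.foldl pvStepA (some (entry, PySem.Dict.empty)) with
  | some pd => pd.2.items.map (fun p => (p.1.1, p.1.2, p.2))
  | none => []   -- unreachable under Pre_ (KeyError)

-- ===== PORT B =====
-- one step of B's position loop: p = (p[0]+dx, p[1]+dy)  (getD never hits its default under Pre_)
def pvStepB (p : Int × Int) (c : Char) : Int × Int :=
  let m := pvMoves.getD c (0, 0)
  (p.1 + m.1, p.2 + m.2)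

def path_to_arrows_alt (entry : Int × Int) (path : String) : List (Int × Int × String) :=
  -- Phase 1: positions = [entry]; for d in path: append the next position
  let positions :=
    (path.toList.foldl (fun (st : List (Int × Int) × (Int × Int)) c =>
        let q := pvStepB st.2 c
        (st.1 ++ [q], q)) ([entry], entry)).1
  -- Phase 2: {pos: symbols[d] for pos, d in zip(positions, path)}
  let d := (positions.zip path.toList).foldl
      (fun (d : PySem.Dict (Int × Int) String) pc => d.insert pc.1 (pvSymbols.getD pc.2 ""))
      PySem.Dict.empty
  d.items.map (fun p => (p.1.1, p.1.2, p.2))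

-- ===== PRECONDITION & SPEC =====
-- Pre_ excludes exactly the paths containing a character other than N/E/S/W, on which A raises KeyError.
def Pre_path_to_arrows (entry : Int × Int) (path : String) : Prop :=
  path.toList.all (fun c => c == 'N' || c == 'E' || c == 'S' || c == 'W') = true
instance (entry : Int × Int) (path : String) : Decidable (Pre_path_to_arrows entry path) := by
  unfold Pre_path_to_arrows; infer_instance

def pvWitness_path_to_arrows : (Int × Int) × String := ((0, 0), "NEESWN")

def Spec_path_to_arrows (entry : Int × Int) (path : String) (out : List (Int × Int × String)) : Prop := out = path_to_arrows_alt entry path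
instance (entry : Int × Int) (path : String) (out : List (Int × Int × String)) : Decidable (Spec_path_to_arrows entry path out) := by unfold Spec_path_to_arrows; infer_instance

-- ===== CLAIM (what is proved, stated in full; the proofs are below) =====
def Claim_equal_path_to_arrows : Prop := ∀ (entry : Int × Int) (path : String), Dom_path_to_arrows entry path → Pre_path_to_arrows entry path → Spec_path_to_arrows entry path (path_to_arrows entry path)

-- ===== LEMMAS AND PROOFS =====

-- B's phase-1 loop is List.scanl pvStepB (positions grow by appending the new last position)
theorem pv_fold_pos (cs : List Char) : ∀ (acc : List (Int × Int)) (p : Int × Int),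
    (cs.foldl (fun (st : List (Int × Int) × (Int × Int)) c =>
        let q := pvStepB st.2 c
        (st.1 ++ [q], q)) (acc ++ [p], p)).1 = acc ++ List.scanl pvStepB p cs := by
  induction cs with
  | nil => intro acc p; simp [List.scanl_nil]
  | cons c rest ih =>
      intro acc p
      simp only [List.foldl_cons, List.scanl_cons]
      have := ih (acc ++ [p]) (pvStepB p c)
      simpa [List.append_assoc] using this

-- main invariant: A's combined loop = insert-fold over (scanl positions) zip chars
theorem pv_main (cs : List Char) : ∀ (p : Int × Int) (d : PySem.Dict (Int × Int) String),
    (∀ c ∈ cs, c = 'N' ∨ c = 'E' ∨ c = 'S' ∨ c = 'W') →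
    cs.foldl pvStepA (some (p, d)) =
      some (cs.foldl pvStepB p,
        ((List.scanl pvStepB p cs).zip cs).foldl
          (fun (d : PySem.Dict (Int × Int) String) pc => d.insert pc.1 (pvSymbols.getD pc.2 ""))
          d) := by
  induction cs with
  | nil => intro p d _; simp [List.scanl_nil]
  | cons c rest ih =>
      intro p d h
      have hc := h c (List.mem_cons_self ..)
      have hr : ∀ c' ∈ rest, c' = 'N' ∨ c' = 'E' ∨ c' = 'S' ∨ c' = 'W' :=
        fun c' hm => h c' (List.mem_cons_of_mem _ hm)
      have key : pvStepA (some (p, d)) c = some (pvStepB p c, d.insert p (pvSymbols.getD c "")) := by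
        rcases hc with rfl | rfl | rfl | rfl <;> rfl
      simp only [List.foldl_cons, List.scanl_cons, List.zip_cons_cons, key]
      exact ih (pvStepB p c) _ hr

-- ===== VERDICT (by name: the statement is the Claim_ definition above) =====
theorem path_to_arrows_spec : Claim_equal_path_to_arrows := by
  intro entry path _hdom hpre
  have hpre' : ∀ c ∈ path.toList, c = 'N' ∨ c = 'E' ∨ c = 'S' ∨ c = 'W' := by
    intro c hc
    have := List.all_eq_true.mp hpre c hc
    simp at this
    tauto
  unfold Spec_path_to_arrows path_to_arrows path_to_arrows_alt
  rw [pv_main path.toList entry PySem.Dict.empty hpre']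
  have hpos := pv_fold_pos path.toList [] entry
  simp only [List.nil_append] at hpos
  rw [hpos]
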